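-- pv_equiv track=rewrite | github.com/DustyPolk/localpass | src/models/database_metadata.py | _is_valid_semver
-- ===== SOURCE A (Python) =====
-- def _is_valid_semver(version: str) -> bool:
--     """Check if version follows semantic versioning format.
--
--     Args:
--         version: Version string to validate
--
--     Returns:
--         True if valid semver format, False otherwise
--     """
--     try:
--         parts = version.split('.')
--         if len(parts) != 3:
--             return False
--
--         # Check each part is a non-negative integer
--         for part in parts:
--             if not part.isdigit():
--                 return False
--             if int(part) < 0:
--                 return False
--
--         return True
--     except:
--         return False
-- ===== SOURCE B (Python) =====
-- def _scan_number(s, i):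
--     """Consume one or more ASCII decimal digits of s starting at index i.
--
--     Returns the index just past the digit run, or -1 if there is no digit at i.
--     """
--     j = i
--     while j < len(s) and '0' <= s[j] <= '9':
--         j += 1
--     return j if j > i else -1
--
--
-- def _is_valid_semver(version: str) -> bool:
--     """Single left-to-right scan: digits+ '.' digits+ '.' digits+ and nothing else."""
--     i = _scan_number(version, 0)
--     if i < 0 or i >= len(version) or version[i] != '.':
--         return False
--     i = _scan_number(version, i + 1)
--     if i < 0 or i >= len(version) or version[i] != '.':
--         return False
--     i = _scan_number(version, i + 1)
--     return i == len(version)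
-- ===== Notes on version B (the rewrite author's own statement) =====
-- stated objective: alternative
-- what changed: Replaces the split-on-dot + length check + per-part isdigit/int loop by a single anchored left-to-right scan (the hand-rolled equivalent of a fullmatch of the fixed digits-dot-digits-dot-digits pattern): three digit runs separated by two dots, then end of string, building no intermediate part list.
import Mathlib
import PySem

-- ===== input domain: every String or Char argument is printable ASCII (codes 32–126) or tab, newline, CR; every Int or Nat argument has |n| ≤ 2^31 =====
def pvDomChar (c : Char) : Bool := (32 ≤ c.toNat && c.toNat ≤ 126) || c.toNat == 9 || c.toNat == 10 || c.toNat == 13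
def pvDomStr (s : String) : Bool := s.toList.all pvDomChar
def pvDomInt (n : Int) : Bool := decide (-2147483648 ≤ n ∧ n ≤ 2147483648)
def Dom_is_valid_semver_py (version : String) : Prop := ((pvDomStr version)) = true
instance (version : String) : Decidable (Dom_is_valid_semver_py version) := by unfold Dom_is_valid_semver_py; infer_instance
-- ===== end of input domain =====

-- B replaces A's split('.') + length check + per-part isdigit/int loop by a single anchored
-- left-to-right scan (digits+ '.' digits+ '.' digits+, then end of input); alternative, same cost.


-- ===== PORT A =====
-- hand port of Python's int(part) at A's call site: exact for the strings that reach it,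
-- which part.isdigit() has already confirmed to be nonempty all-decimal-digit strings
def pyIntOfDigits (p : List Char) : Int :=
  p.foldl (fun n c => 10 * n + ((c.toNat : Int) - 48)) 0

-- the 'for part in parts' loop; 'return False' inside try = result False of the whole function
def checkPartsA : List String → Bool
  | [] => true
  | p :: rest =>
    if !(PySem.Str.strIsdigit p) then false
    else if pyIntOfDigits p.toList < 0 then false
    else checkPartsA rest

def is_valid_semver_py (version : String) : Bool :=
  match PySem.Str.split? version "." with
  | none => false          -- unreachable: the separator "." is nonempty
  | some parts =>
    if parts.length ≠ 3 then false
    else checkPartsA parts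

-- ===== PORT B =====
-- _scan_number's while loop: skip the leading run of ASCII digits
def skipDigits : List Char → List Char
  | [] => []
  | c :: t => if ('0' ≤ c && c ≤ '9') then skipDigits t else c :: t

-- _scan_number: one or more digits, returning the rest of the input (none = no digit here, -1)
def scanNum : List Char → Option (List Char)
  | [] => none
  | c :: t => if ('0' ≤ c && c ≤ '9') then some (skipDigits t) else none

def is_valid_semver_py_alt (version : String) : Bool :=
  match scanNum version.toList with
  | none => false
  | some r1 =>
    match r1 with
    | '.' :: t1 =>
      (match scanNum t1 with
      | none => false
      | some r2 =>
        match r2 with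
        | '.' :: t2 =>
          (match scanNum t2 with
          | none => false
          | some r3 => r3.isEmpty)
        | _ => false)
    | _ => false

-- ===== PRECONDITION & SPEC =====
def Spec_is_valid_semver_py (version : String) (out : Bool) : Prop := out = is_valid_semver_py_alt version
instance (version : String) (out : Bool) : Decidable (Spec_is_valid_semver_py version out) := by unfold Spec_is_valid_semver_py; infer_instance

-- ===== CLAIM (what is proved, stated in full; the proofs are below) =====
def Claim_equal_is_valid_semver_py : Prop := ∀ (version : String), Dom_is_valid_semver_py version → Spec_is_valid_semver_py version (is_valid_semver_py version)

-- ===== LEMMAS AND PROOFS =====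

-- simple recursive model of version.split('.'): (first part, remaining parts)
def sp : List Char → List Char × List (List Char)
  | [] => ([], [])
  | c :: t => if c = '.' then ([], (sp t).1 :: (sp t).2) else (c :: (sp t).1, (sp t).2)

theorem splitOn_go_eq_sp (l : List Char) : ∀ (fuel : Nat) (cur : List Char) (acc : List (List Char)),
    l.length < fuel →
    PySem.Chars.splitOn.go ['.'] fuel l cur acc
      = acc.reverse ++ (cur.reverse ++ (sp l).1) :: (sp l).2 := by
  induction l with
  | nil =>
    intro fuel cur acc h
    match fuel, h with
    | fuel + 1, _ => simp [PySem.Chars.splitOn.go, sp]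
  | cons c t ih =>
    intro fuel cur acc h
    match fuel, h with
    | fuel + 1, h =>
      have ht : t.length < fuel := by simpa using Nat.lt_of_succ_lt_succ h
      by_cases hc : c = '.'
      · subst hc
        rw [show PySem.Chars.splitOn.go ['.'] (fuel + 1) ('.' :: t) cur acc
              = PySem.Chars.splitOn.go ['.'] fuel t [] (cur.reverse :: acc) by
            simp [PySem.Chars.splitOn.go, List.isPrefixOf]]
        rw [ih fuel [] (cur.reverse :: acc) ht]
        simp [sp]
      · rw [show PySem.Chars.splitOn.go ['.'] (fuel + 1) (c :: t) cur acc
              = PySem.Chars.splitOn.go ['.'] fuel t (c :: cur) acc by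
            simp [PySem.Chars.splitOn.go, List.isPrefixOf]
            exact fun h' => absurd h'.symm hc]
        rw [ih fuel (c :: cur) acc ht]
        simp [sp, hc]

theorem splitOn_eq_sp (l : List Char) :
    PySem.Chars.splitOn l ['.'] = ((sp l).1 :: (sp l).2) := by
  have := splitOn_go_eq_sp l (l.length + 1) [] [] (Nat.lt_succ_self _)
  simpa [PySem.Chars.splitOn] using this

-- A's int(part) is nonnegative on digit strings (so the '< 0' branch never fires)
theorem foldl_digits_nonneg (p : List Char) : ∀ (n : Int), 0 ≤ n →
    (∀ x ∈ p, PySem.Chars.isdigit x = true) →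
    0 ≤ p.foldl (fun n c => 10 * n + ((c.toNat : Int) - 48)) n := by
  induction p with
  | nil => intro n hn _; simpa using hn
  | cons c t ih =>
    intro n hn hall
    have hc : PySem.Chars.isdigit c = true := hall c (by simp)
    have h48 : (48 : Nat) ≤ c.toNat := by
      simp [PySem.Chars.isdigit] at hc
      exact Nat.succ_le_of_lt hc.1
    have hstep : 0 ≤ 10 * n + ((c.toNat : Int) - 48) := by
      have : (48 : Int) ≤ (c.toNat : Int) := by exact_mod_cast h48
      omega
    simpa [List.foldl] using ih (10 * n + ((c.toNat : Int) - 48)) hstep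
      (fun x hx => hall x (by simp [hx]))

theorem pyIntOfDigits_nonneg (p : List Char) (hp : ∀ x ∈ p, PySem.Chars.isdigit x = true) :
    0 ≤ pyIntOfDigits p :=
  foldl_digits_nonneg p 0 le_rfl hp

-- A's per-part loop is the all-digits test
theorem checkPartsA_eq (ps : List (List Char)) :
    checkPartsA (ps.map String.ofList) = ps.all PySem.Chars.strIsdigit := by
  induction ps with
  | nil => simp [checkPartsA]
  | cons p rest ih =>
    by_cases hd : PySem.Chars.strIsdigit p = true
    · have h' : ¬p = [] ∧ ∀ x ∈ p, PySem.Chars.isdigit x = true := by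
        simpa [PySem.Chars.strIsdigit] using hd
      have h0 := pyIntOfDigits_nonneg p h'.2
      simp [checkPartsA, PySem.Str.strIsdigit_eq, hd, ih, not_lt.mpr h0]
    · simp [checkPartsA, PySem.Str.strIsdigit_eq, hd]

-- B's digit test is PySem's
theorem digitCond_eq (c : Char) : (('0' ≤ c && c ≤ '9')) = PySem.Chars.isdigit c := by
  simp [PySem.Chars.isdigit]

-- B's scanner with k separators still expected
def chkB : Nat → List Char → Bool
  | k, l =>
    match scanNum l with
    | none => false
    | some r =>
      match k, r with
      | 0, [] => true
      | Nat.succ k', '.' :: t => chkB k' t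
      | _, _ => false

theorem chkB_unfold (k : Nat) (l : List Char) :
    chkB k l =
      match scanNum l with
      | none => false
      | some r =>
        match k, r with
        | 0, [] => true
        | Nat.succ k', '.' :: t => chkB k' t
        | _, _ => false := by
  rw [chkB]

def chkA (k : Nat) (l : List Char) : Bool :=
  ((sp l).2.length == k) && PySem.Chars.strIsdigit (sp l).1
    && (sp l).2.all PySem.Chars.strIsdigit

-- the main induction: A's check on the split parts equals B's scan, for k+1 parts expected
theorem chkA_eq_chkB (n : Nat) : ∀ (l : List Char), l.length ≤ n → ∀ (k : Nat),
    chkA k l = chkB k l := by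
  induction n with
  | zero =>
    intro l hl k
    have : l = [] := List.eq_nil_of_length_eq_zero (Nat.le_zero.mp hl)
    subst this
    rw [chkB_unfold]
    simp [chkA, sp, scanNum, PySem.Chars.strIsdigit]
  | succ n ih =>
    intro l hl k
    match l with
    | [] =>
      rw [chkB_unfold]
      simp [chkA, sp, scanNum, PySem.Chars.strIsdigit]
    | c :: t =>
      have ht : t.length ≤ n := by simpa using Nat.le_of_succ_le_succ hl
      by_cases hc : PySem.Chars.isdigit c = true
      · have hcd : c ≠ '.' := by
          intro h; subst h; simp [PySem.Chars.isdigit] at hc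
        match t with
        | [] =>
          rw [chkB_unfold]
          have hscan : scanNum [c] = some [] := by
            simp [scanNum, digitCond_eq, hc, skipDigits]
          rw [hscan]
          cases k <;> simp [chkA, sp, hcd, PySem.Chars.strIsdigit, hc]
        | d :: t' =>
          have ht' : t'.length ≤ n := Nat.le_of_succ_le ht
          by_cases hdd : PySem.Chars.isdigit d = true
          · have hdot : d ≠ '.' := by
              intro h; subst h; simp [PySem.Chars.isdigit] at hdd
            have e1 : chkA k (c :: d :: t') = chkA k (d :: t') := by
              simp [chkA, sp, hcd, hdot, PySem.Chars.strIsdigit, hc, hdd, Bool.and_assoc]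
            have s1 : scanNum (c :: d :: t') = some (skipDigits t') := by
              simp [scanNum, digitCond_eq, hc, hdd, skipDigits]
            have s2 : scanNum (d :: t') = some (skipDigits t') := by
              simp [scanNum, digitCond_eq, hdd]
            have e2 : chkB k (c :: d :: t') = chkB k (d :: t') := by
              rw [chkB_unfold, s1, chkB_unfold, s2]
            rw [e1, e2, ih (d :: t') ht k]
          · by_cases hdot : d = '.'
            · subst hdot
              have escan : scanNum (c :: '.' :: t') = some ('.' :: t') := by
                simp [scanNum, digitCond_eq, hc, skipDigits]
              match k with
              | 0 =>
                rw [chkB_unfold, escan]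
                simp [chkA, sp, hcd]
              | k' + 1 =>
                have hB : chkB (k' + 1) (c :: '.' :: t') = chkB k' t' := by
                  rw [chkB_unfold, escan]
                  simp
                rw [hB, ← ih t' ht' k']
                simp [chkA, sp, hcd, PySem.Chars.strIsdigit, hc, Bool.and_assoc]
            · have escan : scanNum (c :: d :: t') = some (d :: t') := by
                simp [scanNum, digitCond_eq, hc, skipDigits, hdd]
              have hB : chkB k (c :: d :: t') = false := by
                rw [chkB_unfold, escan]
                cases k <;> simp [hdot]
              rw [hB]
              simp [chkA, sp, hcd, hdot, PySem.Chars.strIsdigit, hdd]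
      · by_cases hcd : c = '.'
        · subst hcd
          rw [chkB_unfold]
          simp [chkA, sp, scanNum, PySem.Chars.strIsdigit]
        · rw [chkB_unfold]
          simp [chkA, sp, scanNum, digitCond_eq, hc, hcd, PySem.Chars.strIsdigit]

-- A's port computes chkA 2
theorem portA_eq_chkA (version : String) :
    is_valid_semver_py version = chkA 2 version.toList := by
  have hsplit : PySem.Str.split? version "."
      = some (((sp version.toList).1 :: (sp version.toList).2).map String.ofList) := by
    simp [PySem.Str.split?, PySem.Chars.split?, splitOn_eq_sp]
  rw [is_valid_semver_py, hsplit]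
  by_cases hlen : (sp version.toList).2.length = 2
  · simpa [chkA, hlen, Bool.and_assoc]
      using checkPartsA_eq ((sp version.toList).1 :: (sp version.toList).2)
  · have h3 : (((sp version.toList).1 :: (sp version.toList).2).map String.ofList).length ≠ 3 := by
      simp
      omega
    have h2 : ((sp version.toList).2.length == 2) = false := by simpa using hlen
    rw [show (match some (List.map String.ofList ((sp version.toList).1 :: (sp version.toList).2)) with
          | none => false
          | some parts => if parts.length ≠ 3 then false else checkPartsA parts)
        = (if (List.map String.ofList ((sp version.toList).1 :: (sp version.toList).2)).length ≠ 3 then false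
           else checkPartsA (List.map String.ofList ((sp version.toList).1 :: (sp version.toList).2))) from rfl,
      if_pos h3]
    simp [chkA, h2]

-- B's port computes chkB 2
theorem chkB_zero (l : List Char) :
    (match scanNum l with
     | none => false
     | some r3 => r3.isEmpty) = chkB 0 l := by
  rw [chkB_unfold]
  rcases scanNum l with _ | r3
  · rfl
  · cases r3 <;> rfl

theorem chkB_one (l : List Char) :
    (match scanNum l with
     | none => false
     | some r2 =>
       match r2 with
       | '.' :: t2 =>
         (match scanNum t2 with
         | none => false
         | some r3 => r3.isEmpty)
       | _ => false) = chkB 1 l := by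
  rw [chkB_unfold]
  rcases scanNum l with _ | r2
  · rfl
  · rcases r2 with _ | ⟨c2, t2⟩
    · rfl
    · by_cases hc2 : c2 = '.'
      · subst hc2
        simpa using chkB_zero t2
      · simp [hc2]

theorem portB_eq_chkB (version : String) :
    is_valid_semver_py_alt version = chkB 2 version.toList := by
  rw [is_valid_semver_py_alt, chkB_unfold]
  rcases scanNum version.toList with _ | r1
  · rfl
  · rcases r1 with _ | ⟨c1, t1⟩
    · rfl
    · by_cases hc1 : c1 = '.'
      · subst hc1
        simpa using chkB_one t1
      · simp [hc1]

-- ===== VERDICT (by name: the statement is the Claim_ definition above) =====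
theorem is_valid_semver_py_spec : Claim_equal_is_valid_semver_py := by
  intro version _
  unfold Spec_is_valid_semver_py
  rw [portA_eq_chkA, portB_eq_chkB,
    chkA_eq_chkB version.toList.length version.toList le_rfl 2]
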